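-- pv_equiv track=rewrite | github.com/rloqvist/VIDE | vide/highlight.py | comments_positions
-- ===== SOURCE A (Python) =====
-- def comments_positions(string):
--     positions = list()
--     for n, line in enumerate(string.split("\n")):
--         i = line.find("//")
--         if i >= 0:
--             pos = {
--                 'start': "%s.%s" % ( n+1, i ),
--                 'stop': "%s.%s" % ( n+1, len(line) ),
--             }
--             positions.append(pos)
--     return positions
-- ===== SOURCE B (Python) =====
-- def comments_positions(string):
--     positions = []
--     n = 1
--     line_len = 0
--     comment_at = -1
--     prev_slash = False
--     for ch in string:
--         if ch == '\n':
--             if comment_at >= 0: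
--                 positions.append({'start': "%s.%s" % (n, comment_at),
--                                   'stop': "%s.%s" % (n, line_len)})
--             n += 1
--             line_len = 0
--             comment_at = -1
--             prev_slash = False
--         else:
--             if comment_at < 0 and prev_slash and ch == '/':
--                 comment_at = line_len - 1
--             prev_slash = ch == '/'
--             line_len += 1
--     if comment_at >= 0:
--         positions.append({'start': "%s.%s" % (n, comment_at),
--                           'stop': "%s.%s" % (n, line_len)})
--     return positions
-- ===== Notes on version B (the rewrite author's own statement) =====
-- stated objective: alternative
-- what changed: Replaces splitting the text into lines and running str.find for the comment marker on each line with a single left-to-right character scan that tracks the line number, line length, a previous-char-was-slash flag and the column of the first marker, emitting an entry at each line break and at end of input.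
import Mathlib
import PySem

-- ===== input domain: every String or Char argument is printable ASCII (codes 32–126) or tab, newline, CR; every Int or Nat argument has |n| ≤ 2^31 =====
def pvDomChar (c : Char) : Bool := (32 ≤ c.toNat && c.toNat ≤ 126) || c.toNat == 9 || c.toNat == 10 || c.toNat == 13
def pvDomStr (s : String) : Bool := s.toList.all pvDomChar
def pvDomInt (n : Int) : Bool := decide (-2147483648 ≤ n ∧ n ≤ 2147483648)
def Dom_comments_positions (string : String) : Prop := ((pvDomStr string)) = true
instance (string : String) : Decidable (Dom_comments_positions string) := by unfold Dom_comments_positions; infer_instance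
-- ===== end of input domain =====

-- B replaces A's split("\n") + per-line str.find("//") with one left-to-right character
-- scan keeping the line number, line length, previous-char-was-'/' flag and first '//' column
-- (objective: alternative single-pass formulation; same O(n) cost).

-- the dict {'start': "%s.%s" % (n, i), 'stop': "%s.%s" % (n, len)} both Pythons build
def pvEntry (n i len : Int) : List (String × String) :=
  [("start", String.ofList (PySem.Int.toChars n ++ '.' :: PySem.Int.toChars i)),
   ("stop",  String.ofList (PySem.Int.toChars n ++ '.' :: PySem.Int.toChars len))]

-- ===== PORT A =====
-- loop body of A: for n, line in enumerate(...): i = line.find("//"); if i >= 0: append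
def pvAStep (positions : List (List (String × String))) (p : Int × List Char) :
    List (List (String × String)) :=
  let i := PySem.Chars.find p.2 ['/', '/']
  if 0 ≤ i then positions ++ [pvEntry (p.1 + 1) i (p.2.length : Int)] else positions

def comments_positions (string : String) : List (List (String × String)) :=
  (PySem.List.enumerate (PySem.Chars.splitOn string.toList ['\n'])).foldl pvAStep []

-- ===== PORT B =====
-- loop body of B: state = (positions, n, line_len, comment_at, prev_slash)
def pvBStep (st : List (List (String × String)) × Int × Int × Int × Bool) (c : Char) :
    List (List (String × String)) × Int × Int × Int × Bool :=
  match st with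
  | (positions, n, lineLen, commentAt, prevSlash) =>
    if c = '\n' then
      ((if 0 ≤ commentAt then positions ++ [pvEntry n commentAt lineLen] else positions),
       n + 1, 0, -1, false)
    else
      (positions, n, lineLen + 1,
       (if commentAt < 0 ∧ prevSlash = true ∧ c = '/' then lineLen - 1 else commentAt),
       c == '/')

-- the trailing "if comment_at >= 0: append" after the loop
def pvFin (st : List (List (String × String)) × Int × Int × Int × Bool) :
    List (List (String × String)) :=
  match st with
  | (positions, n, lineLen, commentAt, _) =>
    if 0 ≤ commentAt then positions ++ [pvEntry n commentAt lineLen] else positions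

def comments_positions_alt (string : String) : List (List (String × String)) :=
  pvFin (string.toList.foldl pvBStep ([], 1, 0, -1, false))

-- ===== PRECONDITION & SPEC =====
def Spec_comments_positions (string : String) (out : List (List (String × String))) : Prop := out = comments_positions_alt string
instance (string : String) (out : List (List (String × String))) : Decidable (Spec_comments_positions string out) := by unfold Spec_comments_positions; infer_instance

-- ===== CLAIM (what is proved, stated in full; the proofs are below) =====
def Claim_equal_comments_positions : Prop := ∀ (string : String), Dom_comments_positions string → Spec_comments_positions string (comments_positions string)

-- ===== LEMMAS AND PROOFS =====

-- the list of lines str.split("\n") produces, written structurally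
def pvLines : List Char → List (List Char)
  | [] => [[]]
  | c :: rest =>
    if c = '\n' then [] :: pvLines rest
    else
      match pvLines rest with
      | l :: ls => (c :: l) :: ls
      | [] => [[c]]

def pvConsHd (u : List Char) : List (List Char) → List (List Char)
  | [] => [u]
  | l :: ls => (u ++ l) :: ls

-- first index of "//", as an Option, structurally
def pvFind2 : List Char → Option Nat
  | [] => none
  | c :: t => if List.isPrefixOf ['/', '/'] (c :: t) then some 0 else (pvFind2 t).map (· + 1)

def pvLastSlash (u : List Char) : Bool := u.getLast? == some '/'

-- A's output on a list of lines, first line numbered n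
def pvAL : List (List Char) → Int → List (List (String × String))
  | [], _ => []
  | l :: ls, n =>
    (if 0 ≤ PySem.Chars.find l ['/', '/'] then
       [pvEntry n (PySem.Chars.find l ['/', '/']) (l.length : Int)]
     else []) ++ pvAL ls (n + 1)

theorem pvLines_ne_nil (cs : List Char) : pvLines cs ≠ [] := by
  cases cs with
  | nil => simp [pvLines]
  | cons c rest =>
    simp only [pvLines]
    split
    · simp
    · cases h : pvLines rest <;> simp

theorem pvFind_go_eq (u : List Char) (k : Nat) :
    PySem.Chars.find.go ['/', '/'] u k =
      (match pvFind2 u with | some i => ((k + i : Nat) : Int) | none => -1) := by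
  induction u generalizing k with
  | nil => simp [PySem.Chars.find.go, pvFind2]
  | cons c t ih =>
    simp only [PySem.Chars.find.go, pvFind2]
    split
    · simp
    · rw [ih (k + 1)]
      cases pvFind2 t
      · simp
      · simp
        ring

theorem pvFind_eq (u : List Char) :
    PySem.Chars.find u ['/', '/'] =
      (match pvFind2 u with | some i => (i : Int) | none => -1) := by
  have := pvFind_go_eq u 0
  simpa [PySem.Chars.find] using this

theorem pvFind2_append (u : List Char) (c : Char) :
    pvFind2 (u ++ [c]) =
      (match pvFind2 u with
       | some i => some i
       | none => if pvLastSlash u = true ∧ c = '/' then some (u.length - 1) else none) := by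
  induction u with
  | nil =>
    simp [pvFind2, pvLastSlash, List.isPrefixOf]
  | cons a t ih =>
    cases t with
    | nil =>
      have hLS : pvLastSlash [a] = (a == '/') := by
        simp [pvLastSlash]
      by_cases ha : a = '/'
      · subst ha
        by_cases hc2 : c = '/'
        · subst hc2
          simp [pvFind2, pvLastSlash, List.isPrefixOf]
        · simp [pvFind2, pvLastSlash, List.isPrefixOf, hc2]
          exact fun h => hc2 h.symm
      · simp [pvFind2, pvLastSlash, List.isPrefixOf, ha]
        intro h
        exact absurd h.symm ha
    | cons b t' =>
      have hL : pvFind2 (a :: b :: t' ++ [c]) =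
          if List.isPrefixOf ['/', '/'] (a :: b :: (t' ++ [c])) = true then some 0
          else (pvFind2 (b :: t' ++ [c])).map (· + 1) := rfl
      have hR : pvFind2 (a :: b :: t') =
          if List.isPrefixOf ['/', '/'] (a :: b :: t') = true then some 0
          else (pvFind2 (b :: t')).map (· + 1) := rfl
      have hpre2 : List.isPrefixOf ['/', '/'] (a :: b :: (t' ++ [c])) =
          List.isPrefixOf ['/', '/'] (a :: b :: t') := by
        simp [List.isPrefixOf]
      rw [hL, hR, hpre2]
      split
      · rfl
      · rw [ih]
        cases h2 : pvFind2 (b :: t') with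
        | some i => simp
        | none =>
          have hlast : pvLastSlash (a :: b :: t') = pvLastSlash (b :: t') := by
            simp [pvLastSlash, List.getLast?_cons_cons]
          rw [hlast]
          by_cases hsl : pvLastSlash (b :: t') = true ∧ c = '/'
          · simp only [if_pos hsl, Option.map_some, List.length_cons]
            congr 1
          · simp [if_neg hsl]

theorem pvSplitOn_go (fuel : Nat) (l cur : List Char) (acc : List (List Char))
    (h : l.length < fuel) :
    PySem.Chars.splitOn.go ['\n'] fuel l cur acc =
      acc.reverse ++ pvConsHd cur.reverse (pvLines l) := by
  induction fuel generalizing l cur acc with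
  | zero => omega
  | succ fuel ih =>
    cases l with
    | nil =>
      simp [PySem.Chars.splitOn.go, pvLines, pvConsHd]
    | cons c rest =>
      simp only [PySem.Chars.splitOn.go]
      by_cases hc : c = '\n'
      · have hpre : List.isPrefixOf ['\n'] (c :: rest) = true := by
          simp [List.isPrefixOf, hc]
        rw [if_pos hpre]
        simp only [List.length_cons, List.length_nil, List.drop_succ_cons, List.drop_zero]
        rw [ih rest [] (cur.reverse :: acc) (by simpa using Nat.lt_of_succ_lt_succ h)]
        obtain ⟨l0, ls0, hl⟩ : ∃ l0 ls0, pvLines rest = l0 :: ls0 := by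
          cases hx : pvLines rest with
          | nil => exact absurd hx (pvLines_ne_nil rest)
          | cons l0 ls0 => exact ⟨l0, ls0, rfl⟩
        simp [pvLines, hc, hl, pvConsHd]
      · have hpre : List.isPrefixOf ['\n'] (c :: rest) = false := by
          simp [List.isPrefixOf]
          intro hcontra
          exact hc hcontra.symm
        rw [if_neg (by simp [hpre])]
        rw [ih rest (c :: cur) acc (by simpa using Nat.lt_of_succ_lt_succ h)]
        obtain ⟨l0, ls0, hl⟩ : ∃ l0 ls0, pvLines rest = l0 :: ls0 := by
          cases hx : pvLines rest with
          | nil => exact absurd hx (pvLines_ne_nil rest)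
          | cons l0 ls0 => exact ⟨l0, ls0, rfl⟩
        simp [pvLines, hc, hl, pvConsHd]

theorem pvSplitOn_eq (cs : List Char) :
    PySem.Chars.splitOn cs ['\n'] = pvLines cs := by
  rw [PySem.Chars.splitOn, pvSplitOn_go (cs.length + 1) cs [] [] (by omega)]
  obtain ⟨l0, ls0, hl⟩ : ∃ l0 ls0, pvLines cs = l0 :: ls0 := by
    cases hx : pvLines cs with
    | nil => exact absurd hx (pvLines_ne_nil cs)
    | cons l0 ls0 => exact ⟨l0, ls0, rfl⟩
  simp [hl, pvConsHd]

theorem pvA_foldl_eq (ls : List (List Char)) (acc : List (List (String × String))) (k : Int) :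
    (PySem.List.enumerate ls k).foldl pvAStep acc = acc ++ pvAL ls (k + 1) := by
  induction ls generalizing acc k with
  | nil => simp [PySem.List.enumerate_nil, pvAL]
  | cons l ls ih =>
    rw [PySem.List.enumerate_cons, List.foldl_cons, ih]
    simp only [pvAStep, pvAL]
    split <;> simp [List.append_assoc]

theorem pvMain (cs : List Char) (acc : List (List (String × String))) (n : Int)
    (u : List Char) :
    pvFin (cs.foldl pvBStep
        (acc, n, (u.length : Int), PySem.Chars.find u ['/', '/'], pvLastSlash u)) =
      acc ++ pvAL (pvConsHd u (pvLines cs)) n := by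
  induction cs generalizing acc n u with
  | nil =>
    simp only [List.foldl_nil, pvFin, pvLines, pvConsHd, pvAL, List.append_nil]
    split <;> simp
  | cons c cs ih =>
    rw [List.foldl_cons]
    obtain ⟨l0, ls0, hl⟩ : ∃ l0 ls0, pvLines cs = l0 :: ls0 := by
      cases hx : pvLines cs with
      | nil => exact absurd hx (pvLines_ne_nil cs)
      | cons l0 ls0 => exact ⟨l0, ls0, rfl⟩
    have hfind0 : PySem.Chars.find [] ['/', '/'] = -1 := by decide
    have hlast0 : pvLastSlash [] = false := by decide
    by_cases hc : c = '\n'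
    · subst hc
      have hstep : pvBStep (acc, n, (u.length : Int), PySem.Chars.find u ['/', '/'], pvLastSlash u) '\n' =
          ((if 0 ≤ PySem.Chars.find u ['/', '/'] then
              acc ++ [pvEntry n (PySem.Chars.find u ['/', '/']) (u.length : Int)] else acc),
           n + 1, ((([] : List Char)).length : Int), PySem.Chars.find [] ['/', '/'],
           pvLastSlash []) := by
        simp [pvBStep, hfind0, hlast0]
      rw [hstep, ih]
      simp only [pvLines, reduceIte, pvConsHd, hl]
      split <;> rename_i hf <;> simp [pvAL, hf, List.append_assoc]
    · have hlen : (u.length : Int) + 1 = (((u ++ [c]).length : Nat) : Int) := by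
        simp
      have hlast : (c == '/') = pvLastSlash (u ++ [c]) := by
        simp [pvLastSlash]
      have hca : (if PySem.Chars.find u ['/', '/'] < 0 ∧ pvLastSlash u = true ∧ c = '/' then
            (u.length : Int) - 1 else PySem.Chars.find u ['/', '/']) =
          PySem.Chars.find (u ++ [c]) ['/', '/'] := by
        rw [pvFind_eq u, pvFind_eq (u ++ [c]), pvFind2_append]
        cases h2 : pvFind2 u with
        | some i =>
          have : ¬ ((i : Int) < 0 ∧ pvLastSlash u = true ∧ c = '/') := by
            intro hcon; have := hcon.1; omega
          simp [this]
        | none =>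
          by_cases hsl : pvLastSlash u = true ∧ c = '/'
          · have hu : u ≠ [] := by
              intro h; rw [h] at hsl; exact absurd hsl.1 (by decide)
            have h1 : 1 ≤ u.length := by
              cases u with
              | nil => exact absurd rfl hu
              | cons _ _ => simp
            rw [if_pos ⟨by norm_num, hsl.1, hsl.2⟩, if_pos hsl]
            push_cast [Nat.cast_sub h1]
            ring
          · rw [if_neg (by intro h; exact hsl ⟨h.2.1, h.2.2⟩), if_neg hsl]
      have hstep : pvBStep (acc, n, (u.length : Int), PySem.Chars.find u ['/', '/'], pvLastSlash u) c =
          (acc, n, (((u ++ [c]).length : Nat) : Int), PySem.Chars.find (u ++ [c]) ['/', '/'],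
           pvLastSlash (u ++ [c])) := by
        simp only [pvBStep, if_neg hc]
        rw [← hca, ← hlast, ← hlen]
      rw [hstep, ih]
      simp only [pvLines, if_neg hc, hl, pvConsHd, pvAL]
      simp [List.append_assoc]

theorem pvA_closed (s : String) :
    comments_positions s = pvAL (pvLines s.toList) 1 := by
  rw [comments_positions, pvSplitOn_eq]
  have := pvA_foldl_eq (pvLines s.toList) [] 0
  simpa using this

theorem pvB_closed (s : String) :
    comments_positions_alt s = pvAL (pvLines s.toList) 1 := by
  rw [comments_positions_alt]
  have h0 : (([] : List (List (String × String))), (1 : Int), (0 : Int), (-1 : Int), false) =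
      (([] : List (List (String × String))), (1 : Int), ((([] : List Char)).length : Int),
        PySem.Chars.find [] ['/', '/'], pvLastSlash []) := by
    simp [pvLastSlash, show PySem.Chars.find [] ['/', '/'] = -1 from by decide]
  rw [h0, pvMain]
  obtain ⟨l0, ls0, hl⟩ : ∃ l0 ls0, pvLines s.toList = l0 :: ls0 := by
    cases hx : pvLines s.toList with
    | nil => exact absurd hx (pvLines_ne_nil s.toList)
    | cons l0 ls0 => exact ⟨l0, ls0, rfl⟩
  simp [hl, pvConsHd]

-- ===== VERDICT (by name: the statement is the Claim_ definition above) =====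
theorem comments_positions_spec : Claim_equal_comments_positions := by
  intro s _
  unfold Spec_comments_positions
  rw [pvA_closed, pvB_closed]
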